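-- pv_equiv track=rewrite | github.com/169kaif/CSE508_Winter2024_A1_2021067 | q2.py | or_not_query_fe
-- ===== SOURCE A (Python) =====
-- def or_not_query_fe(postings_list, t1, file_set):
--
--     answer_set = set()
--
--     #check if t1 already exists
--     if (t1 in postings_list.keys()):
--         for i in range(1, 1000):
--             if i not in postings_list[t1]:
--                 answer_set.add(i)
--     else:
--         for i in range(1,1000):
--             answer_set.add(i)
--
--     for file in file_set:
--         answer_set.add(file)
--
--     return answer_set
-- ===== SOURCE B (Python) =====
-- def or_not_query_fe(postings_list, t1, file_set):
--     # Sort-then-gap-scan: sort the term's postings (clipped to 1..999, dedup),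
--     # emit the gaps between consecutive postings, then union file_set.
--     ps = sorted({d for d in postings_list.get(t1, []) if 1 <= d <= 999})
--     answer = set()
--     prev = 0
--     for d in ps:
--         answer.update(range(prev + 1, d))
--         prev = d
--     answer.update(range(prev + 1, 1000))
--     answer.update(file_set)
--     return answer
-- ===== Notes on version B (the rewrite author's own statement) =====
-- stated objective: alternative
-- what changed: Replaces A's 999-iteration loop with a per-document membership test over the postings list by a sort-then-gap-scan: sort the term's (clipped, deduplicated) postings and emit the ranges of document ids lying in the gaps between consecutive postings, then union file_set.
import Mathlib
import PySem

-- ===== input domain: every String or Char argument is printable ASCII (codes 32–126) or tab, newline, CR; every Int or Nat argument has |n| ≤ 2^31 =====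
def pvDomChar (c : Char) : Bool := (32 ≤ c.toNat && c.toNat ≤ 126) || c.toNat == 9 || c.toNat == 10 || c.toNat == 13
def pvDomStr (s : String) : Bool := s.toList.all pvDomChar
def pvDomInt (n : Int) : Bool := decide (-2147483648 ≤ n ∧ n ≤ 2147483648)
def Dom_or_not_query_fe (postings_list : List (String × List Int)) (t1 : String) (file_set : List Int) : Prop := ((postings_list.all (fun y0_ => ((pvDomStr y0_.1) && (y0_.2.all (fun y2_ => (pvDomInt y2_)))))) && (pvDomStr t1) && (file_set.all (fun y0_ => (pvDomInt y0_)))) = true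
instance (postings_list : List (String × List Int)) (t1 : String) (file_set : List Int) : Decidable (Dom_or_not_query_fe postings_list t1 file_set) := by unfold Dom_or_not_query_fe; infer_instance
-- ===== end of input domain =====

-- B replaces A's 999-iteration membership-test loop by a sort-then-gap-scan over
-- the term's postings (alternative algorithm, equal output as a set).


-- ===== PORT A =====
def or_not_query_fe (postings_list : List (String × List Int)) (t1 : String) (file_set : List Int) : List Int :=
  let answer_set : PySem.Set Int := PySem.Set.empty
  -- check if t1 already exists
  let answer_set : PySem.Set Int :=
    if (postings_list.map Prod.fst).contains t1 then
      (PySem.List.pyRange 1 1000 1).foldl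
        (fun s i =>
          if ((postings_list.lookup t1).getD []).contains i then s
          else PySem.Set.add s i)
        answer_set
    else
      (PySem.List.pyRange 1 1000 1).foldl (fun s i => PySem.Set.add s i) answer_set
  file_set.foldl (fun s f => PySem.Set.add s f) answer_set

-- ===== PORT B =====
def or_not_query_fe_alt (postings_list : List (String × List Int)) (t1 : String) (file_set : List Int) : List Int :=
  -- ps = sorted({d for d in postings_list.get(t1, []) if 1 <= d <= 999})
  let ps : List Int :=
    PySem.List.sorted
      (PySem.Set.ofList (((postings_list.lookup t1).getD []).filter (fun d => 1 ≤ d && d ≤ 999)))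
      (fun x => x) false
  -- gap scan with state (answer, prev)
  let st : PySem.Set Int × Int :=
    ps.foldl (fun st d => (PySem.Set.update st.1 (PySem.List.pyRange (st.2 + 1) d 1), d))
      (PySem.Set.empty, 0)
  let answer := PySem.Set.update st.1 (PySem.List.pyRange (st.2 + 1) 1000 1)
  PySem.Set.update answer file_set

-- ===== PRECONDITION & SPEC =====
def Spec_or_not_query_fe (postings_list : List (String × List Int)) (t1 : String) (file_set : List Int) (out : List Int) : Prop := out = or_not_query_fe_alt postings_list t1 file_set
instance (postings_list : List (String × List Int)) (t1 : String) (file_set : List Int) (out : List Int) : Decidable (Spec_or_not_query_fe postings_list t1 file_set out) := by unfold Spec_or_not_query_fe; infer_instance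

-- ===== CLAIM (what is proved, stated in full; the proofs are below) =====
def Claim_equal_or_not_query_fe : Prop := ∀ (postings_list : List (String × List Int)) (t1 : String) (file_set : List Int), Dom_or_not_query_fe postings_list t1 file_set → Spec_or_not_query_fe postings_list t1 file_set (or_not_query_fe postings_list t1 file_set)

-- ===== LEMMAS AND PROOFS =====

-- adding a nodup list of fresh elements to a set appends it
theorem pv_update_fresh :
    ∀ (l s : List Int), l.Nodup → (∀ x ∈ l, x ∉ s) →
    PySem.Set.update s l = s ++ l := by
  intro l
  induction l with
  | nil => intro s _ _; simp [PySem.Set.update]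
  | cons x t ih =>
    intro s hnd hfr
    rw [List.nodup_cons] at hnd
    have hx : x ∉ s := hfr x List.mem_cons_self
    have hadd : PySem.Set.add s x = s ++ [x] := by
      simp [PySem.Set.add, PySem.Set.contains, hx]
    show PySem.Set.update (PySem.Set.add s x) t = s ++ x :: t
    rw [hadd, ih (s ++ [x]) hnd.2 ?_]
    · simp
    · intro y hy
      simp only [List.mem_append, List.mem_singleton]
      rintro (hys | rfl)
      · exact hfr y (List.mem_cons_of_mem _ hy) hys
      · exact hnd.1 hy

-- A's conditional-add loop over the range is a filter
theorem pv_fold_cond_add (ps : List Int) :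
    ∀ (xs acc : List Int), xs.Nodup → (∀ x ∈ xs, x ∉ acc) →
    xs.foldl (fun s i => if ps.contains i then s else PySem.Set.add s i) acc
      = acc ++ xs.filter (fun i => !ps.contains i) := by
  intro xs
  induction xs with
  | nil => intro acc _ _; simp
  | cons x t ih =>
    intro acc hnd hdis
    rw [List.nodup_cons] at hnd
    by_cases h : ps.contains x = true
    · rw [List.foldl_cons, if_pos h,
        ih acc hnd.2 (fun y hy => hdis y (List.mem_cons_of_mem _ hy)),
        List.filter_cons_of_neg (by rw [h]; decide)]
    · have hx : x ∉ acc := hdis x List.mem_cons_self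
      have hadd : PySem.Set.add acc x = acc ++ [x] := by
        simp [PySem.Set.add, PySem.Set.contains, hx]
      rw [List.foldl_cons, if_neg h, hadd,
        ih (acc ++ [x]) hnd.2 ?_,
        List.filter_cons_of_pos (by rw [Bool.eq_false_iff.mpr h]; rfl)]
      · simp
      · intro y hy
        simp only [List.mem_append, List.mem_singleton]
        rintro (hya | rfl)
        · exact hdis y (List.mem_cons_of_mem _ hy) hya
        · exact hnd.1 hy

theorem pv_lookup_none (l : List (String × List Int)) (t1 : String)
    (h : (l.map Prod.fst).contains t1 = false) : l.lookup t1 = none := by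
  induction l with
  | nil => rfl
  | cons p t ih =>
    simp only [List.map_cons, List.contains_cons, Bool.or_eq_false_iff] at h
    simp [List.lookup, h.1, ih h.2]

-- A's first stage is the filtered range
theorem pv_stage1 (postings_list : List (String × List Int)) (t1 : String) :
    (if (postings_list.map Prod.fst).contains t1 then
      (PySem.List.pyRange 1 1000 1).foldl
        (fun s i =>
          if ((postings_list.lookup t1).getD []).contains i then s
          else PySem.Set.add s i)
        PySem.Set.empty
    else
      (PySem.List.pyRange 1 1000 1).foldl (fun s i => PySem.Set.add s i) PySem.Set.empty)
    = (PySem.List.pyRange 1 1000 1).filter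
        (fun i => !((postings_list.lookup t1).getD []).contains i) := by
  have hnd : (PySem.List.pyRange 1 1000 1).Nodup := PySem.List.nodup_pyRange_one 1 1000
  by_cases h : (postings_list.map Prod.fst).contains t1 = true
  · rw [if_pos h,
      pv_fold_cond_add _ _ PySem.Set.empty hnd (fun x _ hx => absurd hx List.not_mem_nil)]
    exact List.nil_append _
  · rw [if_neg h, pv_lookup_none postings_list t1 (Bool.eq_false_iff.mpr h)]
    show PySem.Set.update PySem.Set.empty (PySem.List.pyRange 1 1000 1) = _
    rw [pv_update_fresh (PySem.List.pyRange 1 1000 1) PySem.Set.empty hnd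
      (fun x _ hx => absurd hx List.not_mem_nil)]
    simp

-- the gap scan of a strictly increasing list ps of elements in (prev, 1000)
-- produces exactly the range (prev, 1000) filtered by non-membership in ps
theorem pv_gap_scan :
    ∀ (ps acc : List Int) (prev : Int), ps.Pairwise (· < ·) →
      (∀ d ∈ ps, prev < d ∧ d < 1000) → (∀ x ∈ acc, x ≤ prev) →
    (let st := ps.foldl
        (fun (st : PySem.Set Int × Int) d =>
          (PySem.Set.update st.1 (PySem.List.pyRange (st.2 + 1) d 1), d)) (acc, prev)
     PySem.Set.update st.1 (PySem.List.pyRange (st.2 + 1) 1000 1))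
    = acc ++ (PySem.List.pyRange (prev + 1) 1000 1).filter (fun i => !ps.contains i) := by
  intro ps
  induction ps with
  | nil =>
    intro acc prev _ _ hacc
    show PySem.Set.update acc (PySem.List.pyRange (prev + 1) 1000 1) = _
    rw [pv_update_fresh _ _ (PySem.List.nodup_pyRange_one _ _) ?_]
    · simp
    · intro x hx hxs
      have := (PySem.List.mem_pyRange_one.mp hx).1
      have := hacc x hxs
      omega
  | cons d rest ih =>
    intro acc prev hpw hmem hacc
    rw [List.pairwise_cons] at hpw
    have hd := hmem d List.mem_cons_self
    have hfr : ∀ x ∈ PySem.List.pyRange (prev + 1) d 1, x ∉ acc := by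
      intro x hx hxs
      have := (PySem.List.mem_pyRange_one.mp hx).1
      have := hacc x hxs
      omega
    have hupd : PySem.Set.update acc (PySem.List.pyRange (prev + 1) d 1)
        = acc ++ PySem.List.pyRange (prev + 1) d 1 :=
      pv_update_fresh _ _ (PySem.List.nodup_pyRange_one _ _) hfr
    have hacc' : ∀ x ∈ acc ++ PySem.List.pyRange (prev + 1) d 1, x ≤ d := by
      intro x hx
      rcases List.mem_append.mp hx with h | h
      · have := hacc x h; omega
      · have := (PySem.List.mem_pyRange_one.mp h).2; omega
    show (let st := rest.foldl _ (PySem.Set.update acc (PySem.List.pyRange (prev + 1) d 1), d);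
          PySem.Set.update st.1 (PySem.List.pyRange (st.2 + 1) 1000 1)) = _
    rw [hupd, ih (acc ++ PySem.List.pyRange (prev + 1) d 1) d hpw.2
      (fun e he => ⟨hpw.1 e he, (hmem e (List.mem_cons_of_mem _ he)).2⟩) hacc']
    -- now pure list algebra on the RHS
    have hlow : List.filter (fun i => !(d :: rest).contains i) (PySem.List.pyRange (prev + 1) d 1)
        = PySem.List.pyRange (prev + 1) d 1 := by
      apply List.filter_eq_self.mpr
      intro x hx
      have hb := PySem.List.mem_pyRange_one.mp hx
      simp only [Bool.not_eq_eq_eq_not, Bool.not_true, List.contains_eq_mem,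
        decide_eq_false_iff_not]
      intro hxc
      rcases List.mem_cons.mp hxc with rfl | hxr
      · omega
      · have := hpw.1 x hxr; omega
    have hhigh : List.filter (fun i => !(d :: rest).contains i) (PySem.List.pyRange (d + 1) 1000 1)
        = List.filter (fun i => !rest.contains i) (PySem.List.pyRange (d + 1) 1000 1) := by
      apply List.filter_congr
      intro x hx
      have hb := PySem.List.mem_pyRange_one.mp hx
      have h1 : (x == d) = false := by
        simp only [beq_eq_false_iff_ne, ne_eq]; omega
      simp only [List.contains_cons, h1, Bool.false_or]
    rw [PySem.List.pyRange_one_append (prev + 1) d 1000 (by omega) (by omega),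
      PySem.List.pyRange_one_cons (show d < 1000 by omega),
      List.filter_append, List.filter_cons_of_neg (by simp), hlow, hhigh,
      List.append_assoc]

-- ===== VERDICT (by name: the statement is the Claim_ definition above) =====
set_option maxRecDepth 8192 in
theorem or_not_query_fe_spec : Claim_equal_or_not_query_fe := by
  intro postings_list t1 file_set _
  unfold Spec_or_not_query_fe or_not_query_fe or_not_query_fe_alt
  set P : List Int := (postings_list.lookup t1).getD [] with hP
  set ps : List Int :=
    PySem.List.sorted (PySem.Set.ofList (P.filter (fun d => 1 ≤ d && d ≤ 999)))
      (fun x => x) false with hps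
  have hpw : ps.Pairwise (· < ·) := PySem.List.sorted_ofList_pairwise_lt _
  have hmemps : ∀ x : Int, x ∈ ps ↔ (x ∈ P ∧ 1 ≤ x ∧ x ≤ 999) := by
    intro x
    rw [hps, PySem.List.mem_sorted, PySem.Set.mem_ofList, List.mem_filter]
    simp
  have hbnd : ∀ d ∈ ps, (0 : Int) < d ∧ d < 1000 := by
    intro d hd
    have := (hmemps d).mp hd
    omega
  show List.foldl (fun s f => PySem.Set.add s f) _ file_set = _
  rw [pv_stage1 postings_list t1]
  show PySem.Set.update _ file_set = PySem.Set.update _ file_set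
  congr 1
  rw [pv_gap_scan ps PySem.Set.empty 0 hpw hbnd
    (fun x hx => absurd hx List.not_mem_nil)]
  show List.filter _ _ = [] ++ List.filter _ (PySem.List.pyRange (0 + 1) 1000 1)
  rw [List.nil_append]
  simp only [zero_add]
  apply List.filter_congr
  intro x hx
  have hb := PySem.List.mem_pyRange_one.mp hx
  have hiff : (x ∈ ps) ↔ (x ∈ P) :=
    ⟨fun h => ((hmemps x).mp h).1, fun h => (hmemps x).mpr ⟨h, by omega, by omega⟩⟩
  show (!(P.contains x)) = !(ps.contains x)
  simp only [List.contains_eq_mem]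
  rw [decide_eq_decide.mpr hiff]
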